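-- pv_equiv track=rewrite | github.com/tugberkute/BIO496---Biopython-Homeworks | part3.py | base_frequency_calculator
-- ===== SOURCE A (Python) =====
-- def base_frequency_calculator(dna_sequence: str):
--     base_dictionary = {}
--     for base in dna_sequence:
--         if len(base_dictionary.keys()) == 4:
--             break
--         elif base in base_dictionary.keys():
--             continue
--         elif base not in base_dictionary.keys():
--             base_dictionary[base] = dna_sequence.count(base)
--     return base_dictionary
-- ===== SOURCE B (Python) =====
-- def base_frequency_calculator(dna_sequence: str):
--     result = {}
--     for base in dna_sequence:
--         if base in result:
--             result[base] += 1
--         elif len(result) < 4: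
--             result[base] = 1
--     return result
-- ===== Notes on version B (the rewrite author's own statement) =====
-- stated objective: alternative
-- what changed: B replaces A's per-new-base full-string .count() rescans (with an early break at 4 keys) by one accumulating left-to-right pass that increments tracked keys and adds new keys only while fewer than 4 are tracked.
import Mathlib
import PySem

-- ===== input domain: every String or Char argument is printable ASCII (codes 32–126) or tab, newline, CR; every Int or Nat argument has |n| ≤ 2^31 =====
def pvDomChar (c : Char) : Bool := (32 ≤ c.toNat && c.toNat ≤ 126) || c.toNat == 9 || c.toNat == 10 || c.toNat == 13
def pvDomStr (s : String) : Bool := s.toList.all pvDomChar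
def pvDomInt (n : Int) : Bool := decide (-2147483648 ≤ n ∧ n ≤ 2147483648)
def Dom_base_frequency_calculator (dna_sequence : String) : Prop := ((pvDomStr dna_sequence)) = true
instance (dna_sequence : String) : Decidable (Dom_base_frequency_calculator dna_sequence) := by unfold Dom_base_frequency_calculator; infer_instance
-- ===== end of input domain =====

-- B replaces A's repeated full-sequence .count() scans (one per new base) with a single
-- accumulating pass; same return value everywhere.

-- ===== PORT A =====
-- literal port of A: walk the string; break at 4 keys; a NEW base is stored with its
-- FULL-sequence substring count dna_sequence.count(base).
def bfcA_loop (s : String) : List Char → PySem.Dict String Int → PySem.Dict String Int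
  | [], d => d
  | c :: rest, d =>
    if d.size == 4 then d
    else if d.contains (String.ofList [c]) then bfcA_loop s rest d
    else bfcA_loop s rest (d.insert (String.ofList [c]) ((PySem.Str.count s (String.ofList [c]) : Int)))

def base_frequency_calculator (dna_sequence : String) : List (String × Int) :=
  (bfcA_loop dna_sequence dna_sequence.toList PySem.Dict.empty).items

-- ===== PORT B =====
-- literal port of Source B: one pass; increment a tracked base, add a new base while fewer
-- than 4 are tracked, otherwise skip; never break.
def bfcB_loop : List Char → PySem.Dict String Int → PySem.Dict String Int
  | [], d => d
  | c :: rest, d =>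
    if d.contains (String.ofList [c]) then
      bfcB_loop rest (d.modify (String.ofList [c]) 0 (· + 1))
    else if d.size < 4 then
      bfcB_loop rest (d.insert (String.ofList [c]) 1)
    else
      bfcB_loop rest d

def base_frequency_calculator_alt (dna_sequence : String) : List (String × Int) :=
  (bfcB_loop dna_sequence.toList PySem.Dict.empty).items

-- ===== PRECONDITION & SPEC =====
def Spec_base_frequency_calculator (dna_sequence : String) (out : List (String × Int)) : Prop := out = base_frequency_calculator_alt dna_sequence
instance (dna_sequence : String) (out : List (String × Int)) : Decidable (Spec_base_frequency_calculator dna_sequence out) := by unfold Spec_base_frequency_calculator; infer_instance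

-- ===== CLAIM (what is proved, stated in full; the proofs are below) =====
def Claim_equal_base_frequency_calculator : Prop := ∀ (dna_sequence : String), Dom_base_frequency_calculator dna_sequence → Spec_base_frequency_calculator dna_sequence (base_frequency_calculator dna_sequence)

-- ===== LEMMAS AND PROOFS =====

-- the key set both loops maintain: first occurrences, capped at 4
def pvKS : List Char → List Char → List Char
  | K, [] => K
  | K, c :: t => if c ∈ K then pvKS K t else if K.length < 4 then pvKS (K ++ [c]) t else pvKS K t

-- the canonical dict: keys K (as 1-char strings) in order, value = count in p
def pvCD (p K : List Char) : PySem.Dict String Int :=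
  PySem.Dict.mk (K.map fun c => (String.ofList [c], (p.count c : Int)))

lemma sstr_beq (a b : Char) : (String.ofList [a] == String.ofList [b]) = (a == b) := by
  rcases eq_or_ne a b with h | h
  · simp [h]
  · have hne : String.ofList [a] ≠ String.ofList [b] := fun hs =>
      h (by simpa using congrArg String.toList hs)
    simp [h, hne]

lemma pvCD_contains (p K : List Char) (c : Char) :
    (pvCD p K).contains (String.ofList [c]) = decide (c ∈ K) := by
  induction K with
  | nil => simp [pvCD, PySem.Dict.contains]
  | cons a K ih =>
    simp only [pvCD, PySem.Dict.contains, List.map_cons, List.any_cons] at *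
    rw [ih]
    rcases eq_or_ne c a with h | h
    · subst h; simp [sstr_beq]
    · have h2 : (a == c) = false := beq_eq_false_iff_ne.2 (Ne.symm h)
      simp [sstr_beq, h2, h]

lemma pvCD_size (p K : List Char) : (pvCD p K).size = K.length := by
  simp [pvCD, PySem.Dict.size]

lemma pvCD_getD_mem (p K : List Char) (c : Char) (hc : c ∈ K) :
    (pvCD p K).getD (String.ofList [c]) 0 = (p.count c : Int) := by
  induction K with
  | nil => cases hc
  | cons a K ih =>
    rcases eq_or_ne c a with h | h
    · subst h
      simp [pvCD, PySem.Dict.getD, PySem.Dict.get?_mk_cons]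
    · have hc' : c ∈ K := by rcases List.mem_cons.1 hc with h' | h' <;> [exact absurd h' h; exact h']
      have := ih hc'
      simpa [pvCD, PySem.Dict.getD, PySem.Dict.get?_mk_cons, sstr_beq,
        (by simpa [eq_comm] using h : ¬ a = c)] using this

lemma pvCD_append_not_mem (p K : List Char) (c : Char) (hc : c ∉ K) :
    pvCD (p ++ [c]) K = pvCD p K := by
  apply PySem.Dict.ext
  simp only [pvCD]
  apply List.map_congr_left
  intro a ha
  have : a ≠ c := fun h => hc (h ▸ ha)
  simp [List.count_append, List.count_eq_zero_of_not_mem (by simp [this] : a ∉ [c])]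

lemma pvCD_insert_fresh (p K : List Char) (c : Char) (hc : c ∉ K) (v : Int) :
    (pvCD p K).insert (String.ofList [c]) v =
      PySem.Dict.mk ((K.map fun a => (String.ofList [a], (p.count a : Int))) ++ [(String.ofList [c], v)]) := by
  have h : (pvCD p K).contains (String.ofList [c]) = false := by
    simp [pvCD_contains, hc]
  simp only [PySem.Dict.insert, h, Bool.false_eq_true, if_false]
  simp [pvCD]

lemma pvCD_insert_new (p K : List Char) (c : Char) (hc : c ∉ K) (hcp : c ∉ p) :
    (pvCD p K).insert (String.ofList [c]) 1 = pvCD (p ++ [c]) (K ++ [c]) := by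
  rw [pvCD_insert_fresh p K c hc 1]
  apply PySem.Dict.ext
  simp only [pvCD, List.map_append, List.map_cons, List.map_nil]
  congr 1
  · apply List.map_congr_left
    intro a ha
    have : a ≠ c := fun h => hc (h ▸ ha)
    simp [List.count_append, List.count_eq_zero, this]
  · simp [List.count_append, List.count_eq_zero_of_not_mem hcp]

lemma pvCD_insert_full (s p K : List Char) (c : Char) (hc : c ∉ K) :
    (pvCD s K).insert (String.ofList [c]) (s.count c : Int) = pvCD s (K ++ [c]) := by
  rw [pvCD_insert_fresh s K c hc]
  apply PySem.Dict.ext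
  simp [pvCD]

lemma pvCD_modify_mem (p K : List Char) (c : Char) (hc : c ∈ K) :
    (pvCD p K).modify (String.ofList [c]) 0 (· + 1) = pvCD (p ++ [c]) K := by
  have hcont : (pvCD p K).contains (String.ofList [c]) = true := by
    simp [pvCD_contains, hc]
  have hget := pvCD_getD_mem p K c hc
  apply PySem.Dict.ext
  simp only [PySem.Dict.modify, PySem.Dict.insert, hcont, if_true, hget]
  simp only [pvCD, List.map_map]
  apply List.map_congr_left
  intro a ha
  rcases eq_or_ne a c with h | h
  · subst h
    simp [List.count_append]
  · simp [Function.comp, sstr_beq, h, List.count_append, List.count_eq_zero]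

lemma pvKS_full (K : List Char) (hK : K.length = 4) : ∀ t, pvKS K t = K := by
  intro t
  induction t with
  | nil => rfl
  | cons c t ih =>
    by_cases h : c ∈ K <;> simp [pvKS, h, hK, ih]

lemma pvCountGo_singleton (c : Char) :
    ∀ (l : List Char) (fuel acc : Nat), l.length ≤ fuel →
      PySem.Chars.count.go [c] fuel l acc = acc + l.count c := by
  intro l
  induction l with
  | nil => intro fuel acc _; cases fuel <;> simp [PySem.Chars.count.go]
  | cons a l ih =>
    intro fuel acc hf
    cases fuel with
    | zero => simp at hf
    | succ fuel =>
      rw [PySem.Chars.count.go]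
      by_cases h : a = c
      · subst h
        simp only [List.isPrefixOf, BEq.rfl, Bool.and_true, List.isPrefixOf_nil_left, if_true,
          List.length_cons, List.length_nil, Nat.zero_add, List.drop_succ_cons, List.drop_zero]
        rw [ih fuel (acc + 1) (by simpa using Nat.lt_succ_iff.1 (Nat.lt_of_lt_of_le (Nat.lt_succ_self _) hf))]
        simp [List.count_cons]
        omega
      · have hca : (c == a) = false := beq_eq_false_iff_ne.2 (fun hh => h hh.symm)
        have : ([c].isPrefixOf (a :: l)) = false := by
          simp [List.isPrefixOf, hca]
        rw [this]
        simp only [Bool.false_eq_true, if_false]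
        rw [ih fuel acc (by simpa using Nat.succ_le_succ_iff.1 hf)]
        simp [List.count_cons, h]

lemma pvStrCount_singleton (s : String) (c : Char) :
    (PySem.Str.count s (String.ofList [c]) : Int) = (s.toList.count c : Int) := by
  have h1 : (String.ofList [c]).toList = [c] := by simp
  simp only [PySem.Str.count_eq]
  rw [h1]
  rw [show PySem.Chars.count s.toList [c] = PySem.Chars.count.go [c] s.toList.length s.toList 0 by
    simp [PySem.Chars.count]]
  rw [pvCountGo_singleton c s.toList s.toList.length 0 le_rfl]
  simp

lemma A_loop_eq (s : String) :
    ∀ (t K : List Char), K.length ≤ 4 →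
      bfcA_loop s t (pvCD s.toList K) = pvCD s.toList (pvKS K t) := by
  intro t
  induction t with
  | nil => intro K _; rfl
  | cons c t ih =>
    intro K hK
    by_cases h4 : K.length = 4
    · rw [pvKS_full K h4]
      simp [bfcA_loop, pvCD_size, h4]
    · have hlt : K.length < 4 := lt_of_le_of_ne hK h4
      by_cases hm : c ∈ K
      · simp only [bfcA_loop, pvCD_size, pvCD_contains, hm, decide_true, if_true]
        rw [if_neg (by simp [h4]), pvKS, if_pos hm]
        exact ih K hK
      · simp only [bfcA_loop, pvCD_size, pvCD_contains, hm, decide_false]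
        rw [if_neg (by simp [h4]), if_neg (by simp), pvKS, if_neg hm, if_pos hlt]
        have hcount : (PySem.Str.count s (String.ofList [c]) : Int) = (s.toList.count c : Int) := by
          rw [pvStrCount_singleton]
        rw [hcount, pvCD_insert_full s.toList s.toList K c hm]
        exact ih (K ++ [c]) (by simp; omega)

lemma B_loop_eq :
    ∀ (t p K : List Char), (∀ a ∈ p, a ∈ K ∨ 4 ≤ K.length) →
      bfcB_loop t (pvCD p K) = pvCD (p ++ t) (pvKS K t) := by
  intro t
  induction t with
  | nil => intro p K _; simp [bfcB_loop, pvKS]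
  | cons c t ih =>
    intro p K hp
    by_cases hm : c ∈ K
    · have hp' : ∀ a ∈ p ++ [c], a ∈ K ∨ 4 ≤ K.length := by
        intro a ha
        rcases List.mem_append.1 ha with h | h
        · exact hp a h
        · simp at h; subst h; exact Or.inl hm
      simp only [bfcB_loop, pvCD_contains, hm, decide_true, if_true]
      rw [pvCD_modify_mem p K c hm, pvKS, if_pos hm, ih (p ++ [c]) K hp']
      simp
    · by_cases h4 : K.length < 4
      · have hcp : c ∉ p := by
          intro hcpm
          rcases hp c hcpm with h | h
          · exact hm h
          · omega
        have hp' : ∀ a ∈ p ++ [c], a ∈ K ++ [c] ∨ 4 ≤ (K ++ [c]).length := by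
          intro a ha
          rcases List.mem_append.1 ha with h | h
          · rcases hp a h with h' | h'
            · exact Or.inl (List.mem_append.2 (Or.inl h'))
            · right; simp; omega
          · simp at h; subst h; exact Or.inl (by simp)
        simp only [bfcB_loop, pvCD_contains, hm, decide_false, Bool.false_eq_true, if_false,
          pvCD_size]
        rw [if_pos (by exact_mod_cast h4), pvCD_insert_new p K c hm hcp, pvKS, if_neg hm,
          if_pos h4, ih (p ++ [c]) (K ++ [c]) hp']
        simp
      · have hp' : ∀ a ∈ p ++ [c], a ∈ K ∨ 4 ≤ K.length := by
          intro a _; right; omega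
        simp only [bfcB_loop, pvCD_contains, hm, decide_false, Bool.false_eq_true, if_false,
          pvCD_size]
        rw [if_neg (by exact_mod_cast h4), pvKS, if_neg hm, if_neg h4,
          ← pvCD_append_not_mem p K c hm, ih (p ++ [c]) K hp']
        simp

-- ===== VERDICT (by name: the statement is the Claim_ definition above) =====
theorem base_frequency_calculator_spec : Claim_equal_base_frequency_calculator := by
  intro s _
  unfold Spec_base_frequency_calculator base_frequency_calculator base_frequency_calculator_alt
  show (bfcA_loop s s.toList (pvCD s.toList [])).items = (bfcB_loop s.toList (pvCD [] [])).items
  rw [A_loop_eq s s.toList [] (by simp), B_loop_eq s.toList [] [] (by simp)]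
  simp
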